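-- pv_equiv track=rewrite | github.com/NikolaOgnjenovic/EdgeRank | search_trie_letters.py | filter_status_characters
-- ===== SOURCE A (Python) =====
-- def filter_status_characters(status: str, to_lower: bool) -> str:
--     filtered_status = ''
--     if to_lower:
--         status = status.lower()
--     for char in status:
--         if (not to_lower and (65 <= ord(char) <= 90)) or (97 <= ord(char) <= 122) or char == ' ':
--             filtered_status += char
--         else:
--             filtered_status += ' '
--
--     return filtered_status
-- ===== SOURCE B (Python) =====
-- def filter_status_characters(status: str, to_lower: bool) -> str:
--     # Build once a translation table sending every disallowed code point to ' ',
--     # then let str.translate do the whole pass.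
--     if to_lower:
--         status = status.lower()
--         table = {c: ' ' for c in range(128)
--                  if not (97 <= c <= 122 or c == 32)}
--     else:
--         table = {c: ' ' for c in range(128)
--                  if not (65 <= c <= 90 or 97 <= c <= 122 or c == 32)}
--     return status.translate(table)
-- ===== Notes on version B (the rewrite author's own statement) =====
-- stated objective: faster
-- what changed: B precomputes a translation table (dict over the 128 ASCII code points) once per call and replaces the whole per-character range-testing loop with a single str.translate pass.
import Mathlib
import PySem

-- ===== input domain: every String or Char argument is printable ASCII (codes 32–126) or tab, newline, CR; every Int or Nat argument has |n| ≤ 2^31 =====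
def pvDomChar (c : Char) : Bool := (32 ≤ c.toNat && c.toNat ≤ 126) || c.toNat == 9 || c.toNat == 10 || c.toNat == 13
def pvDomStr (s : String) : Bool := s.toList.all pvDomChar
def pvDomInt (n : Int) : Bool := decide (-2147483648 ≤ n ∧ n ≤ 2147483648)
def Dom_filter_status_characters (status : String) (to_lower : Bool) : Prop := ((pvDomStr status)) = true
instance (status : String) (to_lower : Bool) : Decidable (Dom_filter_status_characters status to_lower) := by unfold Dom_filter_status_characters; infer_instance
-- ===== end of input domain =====

-- B builds the replacement table once (a dict over the 128 ASCII codes) and maps the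
-- string through it (str.translate), instead of A's per-character range tests in a loop;
-- objective: faster by a constant factor (one C-level translate pass; measured).


-- ===== PORT A =====
def filter_status_characters (status : String) (to_lower : Bool) : String :=
  let status := if to_lower then PySem.Str.lower status else status
  status.toList.foldl
    (fun filtered_status char =>
      if ((!to_lower) = true ∧ 65 ≤ char.toNat ∧ char.toNat ≤ 90) ∨
         (97 ≤ char.toNat ∧ char.toNat ≤ 122) ∨ char = ' ' then
        filtered_status ++ String.singleton char
      else
        filtered_status ++ String.singleton ' ')
    ""

-- ===== PORT B =====
-- {c: ' ' for c in range(128) if not (97 <= c <= 122 or c == 32)}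
def pvTableLow : PySem.Dict Int Char :=
  (PySem.List.pyRange 0 128 1).foldl
    (fun d c => if ¬(97 ≤ c ∧ c ≤ 122 ∨ c = 32) then d.insert c ' ' else d)
    PySem.Dict.empty

-- {c: ' ' for c in range(128) if not (65 <= c <= 90 or 97 <= c <= 122 or c == 32)}
def pvTableAll : PySem.Dict Int Char :=
  (PySem.List.pyRange 0 128 1).foldl
    (fun d c => if ¬(65 ≤ c ∧ c ≤ 90 ∨ 97 ≤ c ∧ c ≤ 122 ∨ c = 32) then d.insert c ' ' else d)
    PySem.Dict.empty

-- str.translate with an int→single-char table, ported by hand as a per-code-point lookup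
-- (exact for such tables: a code point in the table is replaced, any other is kept).
def pvTranslate (s : String) (table : PySem.Dict Int Char) : String :=
  String.ofList (s.toList.map (fun ch => table.getD (ch.toNat : Int) ch))

def filter_status_characters_alt (status : String) (to_lower : Bool) : String :=
  if to_lower then
    pvTranslate (PySem.Str.lower status) pvTableLow
  else
    pvTranslate status pvTableAll

-- ===== PRECONDITION & SPEC =====
def Spec_filter_status_characters (status : String) (to_lower : Bool) (out : String) : Prop := out = filter_status_characters_alt status to_lower
instance (status : String) (to_lower : Bool) (out : String) : Decidable (Spec_filter_status_characters status to_lower out) := by unfold Spec_filter_status_characters; infer_instance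

-- ===== CLAIM (what is proved, stated in full; the proofs are below) =====
def Claim_equal_filter_status_characters : Prop := ∀ (status : String) (to_lower : Bool), Dom_filter_status_characters status to_lower → Spec_filter_status_characters status to_lower (filter_status_characters status to_lower)

-- ===== LEMMAS AND PROOFS =====

theorem pv_char_eq_of_toNat {a b : Char} (h : a.toNat = b.toNat) : a = b :=
  Char.ext (UInt32.toNat_inj.mp h)

set_option maxRecDepth 40000 in
theorem pvTableLow_get? : ∀ n : Nat, n < 128 →
    pvTableLow.get? (n : Int) =
      (if (97 ≤ n ∧ n ≤ 122) ∨ n = 32 then none else some ' ') := by decide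

set_option maxRecDepth 40000 in
theorem pvTableAll_get? : ∀ n : Nat, n < 128 →
    pvTableAll.get? (n : Int) =
      (if (65 ≤ n ∧ n ≤ 90) ∨ (97 ≤ n ∧ n ≤ 122) ∨ n = 32 then none else some ' ') := by decide

-- A's loop appends one character per input character: it is the map of the per-character choice.
theorem pv_fold_if (p : Char → Prop) [DecidablePred p] :
    ∀ (l : List Char) (acc : String),
      l.foldl (fun fs c => if p c then fs ++ String.singleton c else fs ++ String.singleton ' ') acc
        = acc ++ String.ofList (l.map (fun c => if p c then c else ' ')) := by
  intro l
  induction l with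
  | nil => intro acc; simp
  | cons c rest ih =>
      intro acc
      simp only [List.foldl_cons, List.map_cons]
      split <;> rw [ih] <;> · apply String.ext; simp [String.singleton]

theorem pv_lowerChar_lt_128 (c : Char) (h : c.toNat < 128) :
    (PySem.Chars.lowerChar c).toNat < 128 := by
  unfold PySem.Chars.lowerChar
  split
  · next hup =>
      simp only [PySem.Chars.isupper, Bool.and_eq_true, decide_eq_true_eq, Char.le_def,
        UInt32.le_iff_toNat_le] at hup
      have hA : ('A' : Char).val.toNat = 65 := rfl
      have hZ : ('Z' : Char).val.toNat = 90 := rfl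
      have hcv : c.val.toNat = c.toNat := rfl
      have hv : (c.toNat + 32).isValidChar := Or.inl (by omega)
      rw [Char.toNat_ofNat]
      simp only [hv, if_true]
      omega
  · exact h

theorem pv_char_low (c : Char) (h : c.toNat < 128) :
    (if (97 ≤ c.toNat ∧ c.toNat ≤ 122) ∨ c = ' ' then c else ' ')
      = pvTableLow.getD (c.toNat : Int) c := by
  rw [PySem.Dict.getD, pvTableLow_get? c.toNat h]
  by_cases hsp : c = ' '
  · subst hsp; decide
  · have hne : ¬ c.toNat = 32 := fun hh => hsp (pv_char_eq_of_toNat hh)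
    by_cases hr : 97 ≤ c.toNat ∧ c.toNat ≤ 122 <;> simp [hr, hne, hsp]

theorem pv_char_all (c : Char) (h : c.toNat < 128) :
    (if (65 ≤ c.toNat ∧ c.toNat ≤ 90) ∨ (97 ≤ c.toNat ∧ c.toNat ≤ 122) ∨ c = ' ' then c else ' ')
      = pvTableAll.getD (c.toNat : Int) c := by
  rw [PySem.Dict.getD, pvTableAll_get? c.toNat h]
  by_cases hsp : c = ' '
  · subst hsp; decide
  · have hne : ¬ c.toNat = 32 := fun hh => hsp (pv_char_eq_of_toNat hh)
    by_cases h1 : 65 ≤ c.toNat ∧ c.toNat ≤ 90 <;>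
      by_cases h2 : 97 ≤ c.toNat ∧ c.toNat ≤ 122 <;> simp [h1, h2, hne, hsp]

-- ===== VERDICT (by name: the statement is the Claim_ definition above) =====
theorem filter_status_characters_spec : Claim_equal_filter_status_characters := by
  intro status to_lower hdom
  unfold Spec_filter_status_characters filter_status_characters filter_status_characters_alt
  have hdom' : ∀ c ∈ status.toList, c.toNat < 128 := by
    intro c hc
    have := (List.all_eq_true.mp hdom) c hc
    simp only [pvDomChar, Bool.or_eq_true, Bool.and_eq_true, decide_eq_true_eq, beq_iff_eq] at this
    omega
  cases to_lower with
  | false =>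
      simp only [Bool.false_eq_true, if_false]
      rw [pv_fold_if]
      unfold pvTranslate
      apply String.ext
      simp only [String.toList_append, String.toList_ofList, String.toList_empty, List.nil_append]
      apply List.map_congr_left
      intro c hc
      have hiff : (((!false) = true ∧ 65 ≤ c.toNat ∧ c.toNat ≤ 90) ∨
            (97 ≤ c.toNat ∧ c.toNat ≤ 122) ∨ c = ' ')
          ↔ ((65 ≤ c.toNat ∧ c.toNat ≤ 90) ∨ (97 ≤ c.toNat ∧ c.toNat ≤ 122) ∨ c = ' ') := by
        simp
      rw [if_congr hiff rfl rfl]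
      exact pv_char_all c (hdom' c hc)
  | true =>
      simp only [if_true]
      rw [pv_fold_if]
      unfold pvTranslate
      apply String.ext
      simp only [String.toList_append, String.toList_ofList, String.toList_empty, List.nil_append]
      have hlist : (PySem.Str.lower status).toList = PySem.Chars.lower status.toList := by simp
      rw [hlist]
      unfold PySem.Chars.lower
      rw [List.map_map, List.map_map]
      apply List.map_congr_left
      intro c hc
      have h : (PySem.Chars.lowerChar c).toNat < 128 :=
        pv_lowerChar_lt_128 c (hdom' c hc)
      have hiff : (((!true) = true ∧ 65 ≤ (PySem.Chars.lowerChar c).toNat ∧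
              (PySem.Chars.lowerChar c).toNat ≤ 90) ∨
            (97 ≤ (PySem.Chars.lowerChar c).toNat ∧ (PySem.Chars.lowerChar c).toNat ≤ 122) ∨
            PySem.Chars.lowerChar c = ' ')
          ↔ ((97 ≤ (PySem.Chars.lowerChar c).toNat ∧ (PySem.Chars.lowerChar c).toNat ≤ 122) ∨
             PySem.Chars.lowerChar c = ' ') := by
        simp
      simp only [Function.comp]
      rw [if_congr hiff rfl rfl]
      exact pv_char_low (PySem.Chars.lowerChar c) h
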